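-- pv_equiv track=rewrite | github.com/thezooperman/CodeChallenges | active_inactive_cells.py | activeAndInactive
-- ===== SOURCE A (Python) =====
-- from typing import List
--
-- def set_cell_value(x: int, arr: List[int], temp_store: List[int]) -> None:
--     if 0 <= x < len(arr):
--         if x == 0:
--             temp_store[x] = 0 ^ arr[x + 1]
--         elif x == len(arr) - 1:
--             temp_store[x] = 0 ^ arr[x - 1]
--         else:
--             temp_store[x] = arr[x - 1] ^ arr[x + 1]
--
-- def activeAndInactive(cells: List[int], k: int) -> tuple:
--     temp_store = list(cells)
--     while (k):
--         k -= 1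
--         i = 0
--         while i < len(cells):
--             set_cell_value(i, cells, temp_store)
--             i += 1
--         cells, temp_store = temp_store, cells
--
--     active = inactive = 0
--     for i in cells:
--         if i == 0:
--             inactive += 1
--         else:
--             active += 1
--
--     return (active, inactive)
-- ===== SOURCE B (Python) =====
-- def activeAndInactive(cells, k):
--     # Cycle detection on the sequence of states: simulate until the state
--     # repeats, then jump straight to step k using the period.
--     def step(state):
--         n = len(state)
--         return tuple(
--             (state[i - 1] if i > 0 else 0) ^ (state[i + 1] if i + 1 < n else 0)
--             for i in range(n)
--         )
--
--     state = tuple(cells)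
--     trail = [state]
--     pos = {state: 0}
--     t = 0
--     while t < k:
--         state = step(state)
--         t += 1
--         if state in pos:
--             s = pos[state]
--             state = trail[s + (k - s) % (t - s)]
--             break
--         pos[state] = t
--         trail.append(state)
--
--     active = sum(1 for v in state if v != 0)
--     return (active, len(state) - active)
-- ===== Notes on version B (the rewrite author's own statement) =====
-- stated objective: alternative
-- what changed: B replaces A's unconditional simulation of all k generations by cycle detection on the sequence of states (a dict of seen states), jumping directly to step k once a state repeats; intended as faster on periodic inputs (measured 2.08x at the largest size both finished, unconfirmed overall).
import Mathlib
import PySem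

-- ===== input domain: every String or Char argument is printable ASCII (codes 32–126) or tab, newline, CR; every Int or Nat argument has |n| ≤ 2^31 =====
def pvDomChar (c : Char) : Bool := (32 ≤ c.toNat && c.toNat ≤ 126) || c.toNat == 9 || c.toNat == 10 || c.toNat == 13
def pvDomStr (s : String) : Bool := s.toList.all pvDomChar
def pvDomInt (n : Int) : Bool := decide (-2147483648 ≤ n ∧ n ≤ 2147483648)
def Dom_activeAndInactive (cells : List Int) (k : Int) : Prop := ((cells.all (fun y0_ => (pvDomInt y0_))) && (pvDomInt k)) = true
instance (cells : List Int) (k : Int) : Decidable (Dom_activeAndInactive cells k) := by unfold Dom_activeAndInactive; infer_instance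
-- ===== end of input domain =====

-- B replaces A's step-by-step simulation of all k generations by cycle detection on the
-- sequence of states (jumping to step k once a state repeats). Python A mutates the caller's
-- list for k >= 2 (the buffer swap), B does not: the equivalence proved is about the RETURN value only.

-- ===== PORT A =====
-- set_cell_value: arr[x+1] / arr[x-1] raise IndexError in Python only when len(arr) = 1
-- (excluded by Pre_); on all admitted inputs the indices are in range, so getD is exact.
def setCellValue (x : Nat) (arr : List Int) (temp : List Int) : List Int :=
  if x < arr.length then
    if x = 0 then temp.set x (PySem.Int.bxor 0 (arr.getD (x + 1) 0))
    else if x = arr.length - 1 then temp.set x (PySem.Int.bxor 0 (arr.getD (x - 1) 0))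
    else temp.set x (PySem.Int.bxor (arr.getD (x - 1) 0) (arr.getD (x + 1) 0))
  else temp

-- inner 'while i < len(cells)' loop
def innerLoopA (cells temp : List Int) : List Int :=
  (List.range cells.length).foldl (fun t i => setCellValue i cells t) temp

-- outer 'while (k)' loop including the swap 'cells, temp_store = temp_store, cells'
def outerLoopA : Nat → List Int → List Int → List Int
  | 0, cells, _ => cells
  | m + 1, cells, temp => outerLoopA m (innerLoopA cells temp) cells

-- Python's 'while (k)' diverges for k < 0 (excluded by Pre_); k.toNat counts its iterations for k ≥ 0.
def activeAndInactive (cells : List Int) (k : Int) : List Int :=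
  let final := outerLoopA k.toNat cells cells
  let p := final.foldl
    (fun (p : Int × Int) i => if i = 0 then (p.1, p.2 + 1) else (p.1 + 1, p.2)) (0, 0)
  [p.1, p.2]

-- ===== PORT B =====
def stepB (state : List Int) : List Int :=
  (List.range state.length).map (fun i =>
    PySem.Int.bxor (if 0 < i then state.getD (i - 1) 0 else 0)
      (if i + 1 < state.length then state.getD (i + 1) 0 else 0))

-- 'while t < k' with cycle jump; fuel = k - t. trail[idx] is always in range (proved below), so getD is exact.
def loopB : Nat → List Int → List (List Int) → PySem.Dict (List Int) Nat → Nat → Nat → List Int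
  | 0, state, _, _, _, _ => state
  | fuel + 1, state, trail, pos, t, kn =>
    let s' := stepB state
    let t' := t + 1
    match pos.get? s' with
    | some s => trail.getD (s + (kn - s) % (t' - s)) s'
    | none => loopB fuel s' (trail ++ [s']) (pos.insert s' t') t' kn

def activeAndInactive_alt (cells : List Int) (k : Int) : List Int :=
  let final := loopB k.toNat cells [cells] (PySem.Dict.empty.insert cells 0) 0 k.toNat
  let active : Int := ((final.filter (fun v => v != 0)).length : Int)
  [active, (final.length : Int) - active]

-- ===== PRECONDITION & SPEC =====
-- Pre_ excludes exactly the inputs where Python A does not return: k < 0 (the 'while (k)'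
-- loop never terminates) and len(cells) = 1 with k ≥ 1 (set_cell_value raises IndexError).
def Pre_activeAndInactive (cells : List Int) (k : Int) : Prop :=
  0 ≤ k ∧ (cells.length = 1 → k = 0)
instance (cells : List Int) (k : Int) : Decidable (Pre_activeAndInactive cells k) := by
  unfold Pre_activeAndInactive; infer_instance

def pvWitness_activeAndInactive : List Int × Int := ([1, 0, 1, 1], 3)

def Spec_activeAndInactive (cells : List Int) (k : Int) (out : List Int) : Prop :=
  out = activeAndInactive_alt cells k
instance (cells : List Int) (k : Int) (out : List Int) : Decidable (Spec_activeAndInactive cells k out) := by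
  unfold Spec_activeAndInactive; infer_instance

-- ===== CLAIM (what is proved, stated in full; the proofs are below) =====
def Claim_equal_activeAndInactive : Prop := ∀ (cells : List Int) (k : Int),
  Dom_activeAndInactive cells k → Pre_activeAndInactive cells k →
  Spec_activeAndInactive cells k (activeAndInactive cells k)

-- ===== LEMMAS AND PROOFS =====

-- the value A writes into temp_store[x]
def cellVal (arr : List Int) (x : Nat) : Int :=
  if x = 0 then PySem.Int.bxor 0 (arr.getD (x + 1) 0)
  else if x = arr.length - 1 then PySem.Int.bxor 0 (arr.getD (x - 1) 0)
  else PySem.Int.bxor (arr.getD (x - 1) 0) (arr.getD (x + 1) 0)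

lemma setCellValue_eq (x : Nat) (arr temp : List Int) :
    setCellValue x arr temp = if x < arr.length then temp.set x (cellVal arr x) else temp := by
  unfold setCellValue cellVal
  split_ifs <;> rfl

lemma foldl_set_range (f : Nat → Int) :
    ∀ (n : Nat) (temp : List Int), n ≤ temp.length →
      (List.range n).foldl (fun t i => t.set i (f i)) temp = (List.range n).map f ++ temp.drop n := by
  intro n
  induction n with
  | zero => simp
  | succ n ih =>
    intro temp h
    rw [List.range_succ, List.foldl_append, List.map_append]
    rw [ih temp (by omega)]
    simp only [List.foldl_cons, List.foldl_nil, List.map_cons, List.map_nil]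
    rw [List.set_append]
    simp only [List.length_map, List.length_range, lt_irrefl, Nat.sub_self]
    rw [List.drop_eq_getElem_cons (show n < temp.length by omega), List.set_cons_zero]
    simp

lemma innerLoopA_eq (cells temp : List Int) (h : temp.length = cells.length) :
    innerLoopA cells temp = stepB cells := by
  unfold innerLoopA stepB
  have hstep : ∀ (acc : List Int) (x : Nat), x ∈ List.range cells.length →
      setCellValue x cells acc = acc.set x (cellVal cells x) := by
    intro acc x hx
    rw [setCellValue_eq, if_pos (List.mem_range.mp hx)]
  rw [PySem.List.foldl_congr_mem _ _ _ _ hstep]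
  rw [foldl_set_range (cellVal cells) cells.length temp (by omega)]
  rw [List.drop_eq_nil_of_le (by omega), List.append_nil]
  apply List.map_congr_left
  intro i hi
  have hi' : i < cells.length := List.mem_range.mp hi
  unfold cellVal
  by_cases h0 : i = 0
  · subst h0
    rw [if_pos rfl, if_neg (lt_irrefl 0)]
    by_cases h1 : 0 + 1 < cells.length
    · rw [if_pos h1]
    · rw [if_neg h1, List.getD_eq_default _ _ (by omega)]
  · by_cases hl : i = cells.length - 1
    · rw [if_neg h0, if_pos hl, if_pos (by omega : 0 < i), if_neg (by omega : ¬ i + 1 < cells.length)]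
      rw [PySem.Int.bxor_comm]
    · rw [if_neg h0, if_neg hl, if_pos (by omega : 0 < i), if_pos (by omega : i + 1 < cells.length)]

lemma length_stepB (s : List Int) : (stepB s).length = s.length := by
  simp [stepB]

lemma outerLoopA_eq : ∀ (m : Nat) (cells temp : List Int), temp.length = cells.length →
    outerLoopA m cells temp = stepB^[m] cells := by
  intro m
  induction m with
  | zero => intro cells temp _; rfl
  | succ m ih =>
    intro cells temp h
    show outerLoopA m (innerLoopA cells temp) cells = _
    rw [innerLoopA_eq cells temp h,
        ih (stepB cells) cells (by rw [length_stepB]),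
        ← Function.iterate_succ_apply]

lemma iterate_period {α : Type} (g : α → α) (s : α) (a p : Nat) (hp : 0 < p)
    (h : g^[a + p] s = g^[a] s) :
    ∀ m, a ≤ m → g^[m] s = g^[a + (m - a) % p] s := by
  intro m
  induction m using Nat.strong_induction_on with
  | _ m ih =>
    intro ham
    by_cases hm : m < a + p
    · rw [Nat.mod_eq_of_lt (by omega)]
      congr 1
      omega
    · have hdrop : g^[m] s = g^[m - p] s := by
        calc g^[m] s = g^[m - (a + p)] (g^[a + p] s) := by
              rw [← Function.iterate_add_apply]; congr 1; omega
          _ = g^[m - (a + p)] (g^[a] s) := by rw [h]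
          _ = g^[m - p] s := by rw [← Function.iterate_add_apply]; congr 1; omega
      rw [hdrop, ih (m - p) (by omega) (by omega)]
      congr 1
      have : m - a = (m - p - a) + p := by omega
      rw [this, Nat.add_mod_right]

lemma loopB_eq (s0 : List Int) :
    ∀ (fuel t kn : Nat) (trail : List (List Int)) (pos : PySem.Dict (List Int) Nat),
      fuel + t = kn →
      trail = (List.range (t + 1)).map (fun j => stepB^[j] s0) →
      (∀ key s, pos.get? key = some s → stepB^[s] s0 = key ∧ s ≤ t) →
      loopB fuel (stepB^[t] s0) trail pos t kn = stepB^[kn] s0 := by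
  intro fuel
  induction fuel with
  | zero =>
    intro t kn trail pos hk _ _
    have : t = kn := by omega
    subst this
    rfl
  | succ fuel ih =>
    intro t kn trail pos hk htrail hpos
    show (match pos.get? (stepB (stepB^[t] s0)) with
          | some s => trail.getD (s + (kn - s) % (t + 1 - s)) (stepB (stepB^[t] s0))
          | none => loopB fuel (stepB (stepB^[t] s0)) (trail ++ [stepB (stepB^[t] s0)])
              (pos.insert (stepB (stepB^[t] s0)) (t + 1)) (t + 1) kn) = stepB^[kn] s0
    rw [← Function.iterate_succ_apply' stepB t s0]
    cases hget : pos.get? (stepB^[t + 1] s0) with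
    | some s =>
      obtain ⟨hss, hst⟩ := hpos _ _ hget
      have hp : 0 < t + 1 - s := by omega
      have hper : stepB^[s + (t + 1 - s)] s0 = stepB^[s] s0 := by
        rw [show s + (t + 1 - s) = t + 1 by omega, hss]
      have hkn : s ≤ kn := by omega
      have hidx : s + (kn - s) % (t + 1 - s) < t + 1 := by
        have := Nat.mod_lt (kn - s) hp
        omega
      show trail.getD (s + (kn - s) % (t + 1 - s)) (stepB^[t + 1] s0) = stepB^[kn] s0
      rw [htrail, List.getD_eq_getElem _ _
        (by simp only [List.length_map, List.length_range]; exact hidx)]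
      rw [List.getElem_map, List.getElem_range]
      rw [iterate_period stepB s0 s (t + 1 - s) hp hper kn hkn]
    | none =>
      show loopB fuel (stepB^[t + 1] s0) (trail ++ [stepB^[t + 1] s0])
        (pos.insert (stepB^[t + 1] s0) (t + 1)) (t + 1) kn = stepB^[kn] s0
      have htrail' : trail ++ [stepB^[t + 1] s0] =
          List.map (fun j => stepB^[j] s0) (List.range (t + 1 + 1)) := by
        rw [htrail]
        conv_rhs => rw [List.range_succ]
        simp
      have hpos' : ∀ key s, (pos.insert (stepB^[t + 1] s0) (t + 1)).get? key = some s →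
          stepB^[s] s0 = key ∧ s ≤ t + 1 := by
        intro key s hks
        rw [PySem.Dict.get?_insert] at hks
        split_ifs at hks with hkey
        · injection hks with h
          subst h
          exact ⟨hkey.symm, le_refl _⟩
        · obtain ⟨h1, h2⟩ := hpos _ _ hks
          exact ⟨h1, by omega⟩
      exact ih (t + 1) kn _ _ (by omega) htrail' hpos' 

lemma count_foldl :
    ∀ (l : List Int) (a i : Int),
      l.foldl (fun (p : Int × Int) v => if v = 0 then (p.1, p.2 + 1) else (p.1 + 1, p.2)) (a, i) =
      (a + ((l.filter (fun v => v != 0)).length : Int),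
       i + ((l.length : Int) - ((l.filter (fun v => v != 0)).length : Int))) := by
  intro l
  induction l with
  | nil => simp
  | cons v l ih =>
    intro a i
    by_cases hv : v = 0
    · subst hv
      simp only [List.foldl_cons, List.filter_cons]
      norm_num [ih]
      ring
    · simp only [List.foldl_cons, if_neg hv, List.filter_cons,
        show (v != 0) = true by simpa using hv, if_true, List.length_cons, ih, Prod.mk.injEq]
      constructor <;> push_cast <;> ring

-- ===== VERDICT (by name: the statement is the Claim_ definition above) =====
theorem activeAndInactive_spec : Claim_equal_activeAndInactive := by
  intro cells k _ _
  simp only [Spec_activeAndInactive, activeAndInactive, activeAndInactive_alt]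
  rw [outerLoopA_eq k.toNat cells cells rfl]
  have hpos0 : ∀ key s, ((PySem.Dict.empty).insert cells 0).get? key = some s →
      stepB^[s] cells = key ∧ s ≤ 0 := by
    intro key s hks
    rw [PySem.Dict.get?_insert] at hks
    split_ifs at hks with hkey
    · injection hks with h
      subst h
      exact ⟨hkey.symm, le_refl 0⟩
    · rw [PySem.Dict.get?_empty] at hks
      exact absurd hks (by simp)
  have hloop := loopB_eq cells k.toNat 0 k.toNat [cells] (PySem.Dict.empty.insert cells 0)
      (by omega) (by simp) hpos0
  simp only [Function.iterate_zero, id] at hloop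
  rw [hloop, count_foldl]
  norm_num
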